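-- pv_equiv track=rewrite | github.com/J-mock/322-Final-Project | mysklearn/myutils.py | conf_matrix_stats
-- ===== SOURCE A (Python) =====
-- def conf_matrix_stats(actual, predicted):
--     tp = 0
--     tn = 0
--     fp = 0
--     fn = 0
--     for a, p in zip(actual, predicted):
--         if a == 'yes' and p == 'yes':
--             tp += 1
--         elif a == 'no' and p == 'no':
--             tn += 1
--         elif a == 'yes' and p == 'no':
--             fn += 1
--         elif a == 'no' and p == 'yes':
--             fp += 1
--
--     return tp, fp, tn, fn
-- ===== SOURCE B (Python) =====
-- def conf_matrix_stats(actual, predicted):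
--     # Staged passes: materialise the pair list once, then take four independent
--     # count() scans, one per confusion-matrix cell, instead of classifying each
--     # element with an if/elif chain into branch-updated counters.
--     pairs = list(zip(actual, predicted))
--     return (pairs.count(('yes', 'yes')),
--             pairs.count(('no', 'yes')),
--             pairs.count(('no', 'no')),
--             pairs.count(('yes', 'no')))
-- ===== Notes on version B (the rewrite author's own statement) =====
-- stated objective: idiomatic
-- what changed: Replaces the single classifying pass with four branch-updated scalar counters by four independent list.count scans over the materialised pair list, one per confusion-matrix cell.
import Mathlib
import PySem

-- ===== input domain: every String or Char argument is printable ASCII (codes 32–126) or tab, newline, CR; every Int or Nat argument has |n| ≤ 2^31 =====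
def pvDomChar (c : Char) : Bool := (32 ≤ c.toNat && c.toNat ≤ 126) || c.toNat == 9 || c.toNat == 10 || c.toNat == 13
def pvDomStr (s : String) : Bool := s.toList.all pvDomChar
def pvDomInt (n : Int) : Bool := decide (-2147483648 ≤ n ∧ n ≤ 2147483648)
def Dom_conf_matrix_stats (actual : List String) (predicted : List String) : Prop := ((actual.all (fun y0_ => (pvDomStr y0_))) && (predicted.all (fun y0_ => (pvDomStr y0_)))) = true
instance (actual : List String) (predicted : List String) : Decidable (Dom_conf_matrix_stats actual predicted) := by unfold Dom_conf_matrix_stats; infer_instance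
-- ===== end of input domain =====

-- B replaces A's single classifying pass (if/elif over four scalar counters) with four independent count scans of the pair list; objective: idiomatic.


-- ===== PORT A =====
-- A: if/elif chain updating four scalar counters over zip(actual, predicted); returns (tp, fp, tn, fn)
def conf_matrix_stats (actual : List String) (predicted : List String) : Int × Int × Int × Int :=
  let st := (actual.zip predicted).foldl
    (fun (st : Int × Int × Int × Int) (ap : String × String) =>
      let (tp, tn, fp, fn) := st
      let (a, p) := ap
      if a == "yes" && p == "yes" then (tp + 1, tn, fp, fn)
      else if a == "no" && p == "no" then (tp, tn + 1, fp, fn)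
      else if a == "yes" && p == "no" then (tp, tn, fp, fn + 1)
      else if a == "no" && p == "yes" then (tp, tn, fp + 1, fn)
      else (tp, tn, fp, fn))
    (0, 0, 0, 0)
  (st.1, st.2.2.1, st.2.1, st.2.2.2)

-- ===== PORT B =====
-- B: materialise the pair list once, then four independent count scans, one per cell
def conf_matrix_stats_alt (actual : List String) (predicted : List String) : Int × Int × Int × Int :=
  let pairs := actual.zip predicted
  ((PySem.List.count pairs ("yes", "yes") : Int),
   (PySem.List.count pairs ("no", "yes") : Int),
   (PySem.List.count pairs ("no", "no") : Int),
   (PySem.List.count pairs ("yes", "no") : Int))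

-- ===== PRECONDITION & SPEC =====
def Spec_conf_matrix_stats (actual : List String) (predicted : List String) (out : Int × Int × Int × Int) : Prop := out = conf_matrix_stats_alt actual predicted
instance (actual : List String) (predicted : List String) (out : Int × Int × Int × Int) : Decidable (Spec_conf_matrix_stats actual predicted out) := by unfold Spec_conf_matrix_stats; infer_instance

-- ===== CLAIM (what is proved, stated in full; the proofs are below) =====
def Claim_equal_conf_matrix_stats : Prop := ∀ (actual : List String) (predicted : List String), Dom_conf_matrix_stats actual predicted → Spec_conf_matrix_stats actual predicted (conf_matrix_stats actual predicted)

-- ===== LEMMAS AND PROOFS =====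

lemma confLoop_counts (l : List (String × String)) (tp tn fp fn : Int) :
    l.foldl
      (fun (st : Int × Int × Int × Int) (ap : String × String) =>
        let (tp, tn, fp, fn) := st
        let (a, p) := ap
        if a == "yes" && p == "yes" then (tp + 1, tn, fp, fn)
        else if a == "no" && p == "no" then (tp, tn + 1, fp, fn)
        else if a == "yes" && p == "no" then (tp, tn, fp, fn + 1)
        else if a == "no" && p == "yes" then (tp, tn, fp + 1, fn)
        else (tp, tn, fp, fn))
      (tp, tn, fp, fn)
    = (tp + l.count ("yes", "yes"), tn + l.count ("no", "no"),
       fp + l.count ("no", "yes"), fn + l.count ("yes", "no")) := by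
  induction l generalizing tp tn fp fn with
  | nil => simp
  | cons hd tl ih =>
    obtain ⟨a, p⟩ := hd
    simp only [List.foldl_cons, List.count_cons]
    by_cases h1 : a = "yes" <;> by_cases h2 : p = "yes" <;>
      by_cases h3 : a = "no" <;> by_cases h4 : p = "no" <;>
      subst_vars <;>
      simp only [ih, beq_iff_eq, Prod.mk.injEq, String.reduceEq, beq_self_eq_true,
        Bool.and_self, Bool.and_true, Bool.true_and, if_pos, and_true, true_and,
        and_false, false_and, if_false] <;>
      simp_all <;> omega

-- ===== VERDICT (by name: the statement is the Claim_ definition above) =====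
theorem conf_matrix_stats_spec : Claim_equal_conf_matrix_stats := by
  intro actual predicted _
  unfold Spec_conf_matrix_stats conf_matrix_stats conf_matrix_stats_alt
  simp only [confLoop_counts, PySem.List.count_eq, zero_add]
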